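-- pv_equiv track=rewrite | github.com/WaterH2P/Algorithm | OJ/Ex/Ex/string/mat_2_1.py | transIndex
-- ===== SOURCE A (Python) =====
-- strA = ['1', '2', '3', '4', '5', '$', '5', '4', '3', '2', '1']
--
-- def transIndex(index):
--     while index >= 11:
--         strLen = len(strA)
--         itr = 2
--         halfLen = 0
--         while index >= strLen:
--             if strLen <= index < strLen + itr:
--                 index = 5
--             else:
--                 halfLen = strLen
--                 strLen = 2 * strLen + itr
--                 itr += 1
--         if index >= 11:
--             dis = index - halfLen - itr
--             index = halfLen - dis
--     return index
-- ===== SOURCE B (Python) =====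
-- def transIndex(index):
--     if index < 11:
--         return index
--     strLen, itr, halfLen = 11, 2, 0
--     while index >= strLen + itr:
--         halfLen, strLen, itr = strLen, 2 * strLen + itr, itr + 1
--     if index >= strLen:
--         return 5
--     return transIndex(2 * halfLen + itr - index)
-- ===== Notes on version B (the rewrite author's own statement) =====
-- stated objective: simpler
-- what changed: Replaced A's nested while-loops with mutable rebinding by a tail-recursive function: one flat growth loop whose condition (index >= strLen+itr) merges A's inner-loop guard and its bracket test, a direct 'return 5' for the separator bracket, and a recursive call on the mirrored index instead of the outer loop.
import Mathlib
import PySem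

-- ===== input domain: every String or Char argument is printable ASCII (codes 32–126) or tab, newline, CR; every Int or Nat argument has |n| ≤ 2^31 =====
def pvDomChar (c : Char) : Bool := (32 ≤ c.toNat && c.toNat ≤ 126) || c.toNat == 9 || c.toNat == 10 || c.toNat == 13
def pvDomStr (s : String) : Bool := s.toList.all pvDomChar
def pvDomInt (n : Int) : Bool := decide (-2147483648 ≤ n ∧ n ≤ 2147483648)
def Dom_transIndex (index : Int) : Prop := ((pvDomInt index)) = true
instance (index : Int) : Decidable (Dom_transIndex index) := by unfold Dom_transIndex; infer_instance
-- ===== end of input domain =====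

-- B replaces A's nested while-loops by a tail-recursive mapping with one flat growth loop; same values, no speed claim.

-- Small named facts used as the totality arguments of the loop helpers: both loop
-- helpers carry, besides the Python state, a proof (hs, ht, hinv) that the state is one
-- the top-level call can reach, and return their tuple together with the invariant that
-- makes the callers' recursion terminate.  These guards only make the ports total; the
-- computed values are exactly the Python's.
-- the reachability invariant carried by both loop helpers, and A's result invariant
def PvInv (index s t h : Int) : Prop :=
  11 ≤ index → index < s → 0 ≤ 2 * h + t - index ∧ 2 * h + t - index < index
def PvResA (index : Int) (r : Int × Int × Int × Int) : Prop :=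
  (r.1 = 5 ∨ r.1 = index) ∧ r.1 < r.2.1 ∧ PvInv r.1 r.2.1 r.2.2.1 r.2.2.2
def PvA (index : Int) : Type := {r : Int × Int × Int × Int // PvResA index r}
def PvG (index : Int) : Type := {g : Int × Int × Int // PvInv index g.1 g.2.1 g.2.2}

theorem pv11 : (5 : Int) < 11 := by decide
theorem pv2 : (2 : Int) ≤ 2 := by decide
theorem pvGrowHs (s t : Int) (hs : 5 < s) (ht : 2 ≤ t) : 5 < 2 * s + t := by omega
theorem pvGrowHt (t : Int) (ht : 2 ≤ t) : 2 ≤ t + 1 := by omega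
theorem pvInitInv (index : Int) : PvInv index 11 2 0 :=
  fun a b => absurd b (not_lt.mpr a)
theorem pvFiveInv (s t h : Int) : PvInv 5 s t h :=
  fun a => absurd a (by decide)
theorem pvStepInv (index s t : Int) (ht : 2 ≤ t) (h : ¬ index < s + t) :
    PvInv index (2 * s + t) (t + 1) s := by unfold PvInv; omega
theorem pvStepInv' (index s t : Int) (ht : 2 ≤ t) (h : s + t ≤ index) :
    PvInv index (2 * s + t) (t + 1) s := by unfold PvInv; omega
theorem pvBr (index : Int) (r : Int × Int × Int × Int) (h : r.1 = 5 ∨ r.1 = (5 : Int)) :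
    r.1 = 5 ∨ r.1 = index :=
  Or.inl (h.elim id id)
theorem pvInnerDec1 (index s : Int) (hs : 5 < s) (h1 : s ≤ index) :
    ((5 : Int) + 1 - s).toNat < (index + 1 - s).toNat :=
  (Int.toNat_lt_toNat (by omega)).mpr (by omega)
theorem pvInnerDec2 (index s t : Int) (hs : 5 < s) (ht : 2 ≤ t) (h1 : s ≤ index) :
    (index + 1 - (2 * s + t)).toNat < (index + 1 - s).toNat :=
  (Int.toNat_lt_toNat (by omega)).mpr (by omega)
theorem pvGrowDec (index s t : Int) (hs : 5 < s) (ht : 2 ≤ t) (h : s + t ≤ index) :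
    (index + 1 - (2 * s + t + (t + 1))).toNat < (index + 1 - (s + t)).toNat :=
  (Int.toNat_lt_toNat (by omega)).mpr (by omega)
theorem pvOuterDec (index : Int) (r : Int × Int × Int × Int) (h11 : 11 ≤ index)
    (hp : PvResA index r) :
    (if 11 ≤ r.1 then r.2.2.2 - (r.1 - r.2.2.2 - r.2.2.1) else r.1).toNat < index.toNat := by
  obtain ⟨h1, h2, h3⟩ := hp
  unfold PvInv at h3
  refine (Int.toNat_lt_toNat (by omega)).mpr ?_
  split_ifs with hcase
  · rcases h1 with h5 | hid
    · omega
    · have := h3 hcase h2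
      omega
  · rcases h1 with h5 | hid <;> omega
theorem pvAltDec (index : Int) (g : Int × Int × Int) (h : ¬ index < 11) (hge : ¬ g.1 ≤ index)
    (hq : PvInv index g.1 g.2.1 g.2.2) :
    (2 * g.2.2 + g.2.1 - index).toNat < index.toNat := by
  unfold PvInv at hq
  have := hq (by omega) (by omega)
  exact (Int.toNat_lt_toNat (by omega)).mpr (by omega)

-- ===== PORT A =====
-- A's inner 'while index >= strLen' loop, step for step (branch order kept); the
-- subtype part is the reachability/termination guard described above.
def pvInnerA (index strLen itr halfLen : Int) (hs : 5 < strLen) (ht : 2 ≤ itr)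
    (hinv : PvInv index strLen itr halfLen) : PvA index :=
  if _h1 : strLen ≤ index then
    if _h2 : index < strLen + itr then
      let rr := pvInnerA 5 strLen itr halfLen hs ht (pvFiveInv strLen itr halfLen)
      ⟨rr.val, pvBr index rr.val rr.property.1, rr.property.2.1, rr.property.2.2⟩
    else
      pvInnerA index (2 * strLen + itr) (itr + 1) strLen
        (pvGrowHs strLen itr hs ht) (pvGrowHt itr ht)
        (pvStepInv index strLen itr ht _h2)
  else
    ⟨(index, strLen, itr, halfLen), Or.inr rfl, lt_of_not_ge _h1, hinv⟩
termination_by (index + 1 - strLen).toNat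
decreasing_by
  · exact pvInnerDec1 index strLen hs _h1
  · exact pvInnerDec2 index strLen itr hs ht _h1

-- A's outer 'while index >= 11' loop: one inner pass from (11, 2, 0), then the mirror fold
def transIndex (index : Int) : Int :=
  if h : 11 ≤ index then
    let r := pvInnerA index 11 2 0 pv11 pv2 (pvInitInv index)
    let index' :=
      if 11 ≤ r.val.1 then r.val.2.2.2 - (r.val.1 - r.val.2.2.2 - r.val.2.2.1) else r.val.1
    transIndex index'
  else index
termination_by index.toNat
decreasing_by
  exact pvOuterDec index r.val h r.property

-- ===== PORT B =====
-- B's single growth loop: grow (strLen, itr, halfLen) while index >= strLen + itr;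
-- same totality guard.
def pvGrowB (index strLen itr halfLen : Int) (hs : 5 < strLen) (ht : 2 ≤ itr)
    (hinv : PvInv index strLen itr halfLen) : PvG index :=
  if _h : strLen + itr ≤ index then
    pvGrowB index (2 * strLen + itr) (itr + 1) strLen
      (pvGrowHs strLen itr hs ht) (pvGrowHt itr ht)
      (pvStepInv' index strLen itr ht _h)
  else
    ⟨(strLen, itr, halfLen), hinv⟩
termination_by (index + 1 - (strLen + itr)).toNat
decreasing_by
  exact pvGrowDec index strLen itr hs ht _h

def transIndex_alt (index : Int) : Int :=
  if h : index < 11 then index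
  else
    let g := pvGrowB index 11 2 0 pv11 pv2 (pvInitInv index)
    if hge : g.val.1 ≤ index then 5
    else transIndex_alt (2 * g.val.2.2 + g.val.2.1 - index)
termination_by index.toNat
decreasing_by
  exact pvAltDec index g.val h hge g.property

-- ===== PRECONDITION & SPEC =====
def Spec_transIndex (index : Int) (out : Int) : Prop := out = transIndex_alt index
instance (index : Int) (out : Int) : Decidable (Spec_transIndex index out) := by unfold Spec_transIndex; infer_instance

-- ===== CLAIM (what is proved, stated in full; the proofs are below) =====
def Claim_equal_transIndex : Prop := ∀ (index : Int), Dom_transIndex index → Spec_transIndex index (transIndex index)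

-- ===== LEMMAS AND PROOFS =====

-- A's inner loop equals B's growth loop plus the final bracket test
theorem pvInnerA_eq_grow (index strLen itr halfLen : Int) (hs : 5 < strLen) (ht : 2 ≤ itr)
    (hinvA hinvB : PvInv index strLen itr halfLen) :
    (pvInnerA index strLen itr halfLen hs ht hinvA).val =
      (let g := (pvGrowB index strLen itr halfLen hs ht hinvB).val
       if g.1 ≤ index then (5, g.1, g.2.1, g.2.2) else (index, g.1, g.2.1, g.2.2)) := by
  induction strLen, itr, halfLen, hs, ht, hinvB using pvGrowB.induct index with
  | case1 strLen itr halfLen hs ht hinvB h ih =>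
    have h1 : strLen ≤ index := by omega
    have h2 : ¬ index < strLen + itr := by omega
    rw [pvInnerA, dif_pos h1, dif_neg h2, pvGrowB, dif_pos h]
    exact ih _
  | case2 strLen itr halfLen hs ht hinvB h =>
    rw [pvGrowB, dif_neg h]
    dsimp only
    by_cases h1 : strLen ≤ index
    · have h2 : index < strLen + itr := by omega
      have h5 : ¬ strLen ≤ (5 : Int) := by omega
      rw [pvInnerA, dif_pos h1, dif_pos h2]
      dsimp only
      rw [pvInnerA, dif_neg h5, if_pos h1]
    · rw [pvInnerA, dif_neg h1, if_neg h1]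

theorem transIndex_eq_alt (index : Int) : transIndex index = transIndex_alt index := by
  induction index using transIndex.induct with
  | case1 index h r index' ih =>
    have hlt : ¬ index < 11 := by omega
    rw [transIndex, dif_pos h, transIndex_alt, dif_neg hlt]
    dsimp only
    have hg := pvInnerA_eq_grow index 11 2 0 pv11 pv2 (pvInitInv index) (pvInitInv index)
    dsimp only at hg
    set P := (pvInnerA index 11 2 0 pv11 pv2 (pvInitInv index)).val with hPdef
    set G := (pvGrowB index 11 2 0 pv11 pv2 (pvInitInv index)).val with hGdef
    have ih' : transIndex (if 11 ≤ P.1 then P.2.2.2 - (P.1 - P.2.2.2 - P.2.2.1) else P.1) =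
        transIndex_alt (if 11 ≤ P.1 then P.2.2.2 - (P.1 - P.2.2.2 - P.2.2.1) else P.1) := ih
    by_cases hge : G.1 ≤ index
    · rw [if_pos hge] at hg
      rw [dif_pos hge, hg]
      norm_num
      rw [transIndex]
      norm_num
    · rw [if_neg hge] at hg
      rw [dif_neg hge]
      rw [hg] at ih' ⊢
      dsimp only at ih' ⊢
      rw [if_pos h] at ih' ⊢
      have harg : G.2.2 - (index - G.2.2 - G.2.1) = 2 * G.2.2 + G.2.1 - index := by ring
      rw [harg] at ih' ⊢
      exact ih'
  | case2 index h =>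
    rw [transIndex, dif_neg h, transIndex_alt, dif_pos (by omega)]

-- ===== VERDICT (by name: the statement is the Claim_ definition above) =====
theorem transIndex_spec : Claim_equal_transIndex := by
  intro index _
  unfold Spec_transIndex
  exact transIndex_eq_alt index
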